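-- pv_equiv track=rewrite | github.com/EonYang/p5AI | generate.py | parseCharArray
-- ===== SOURCE A (Python) =====
-- def parseCharArray(charArray):
--     r = []
--     string = ''
--     for char in charArray:
--         if char != '\n':
--             string += char
--         else:
--             r.append(string)
--             string = ''
--     return r
-- ===== SOURCE B (Python) =====
-- def parseCharArray(charArray):
--     # split-on-token algorithm: repeatedly find the next '\n' element,
--     # emit the join of everything before it, and continue after it
--     result = []
--     rest = charArray
--     while '\n' in rest:
--         i = rest.index('\n')
--         result.append(''.join(rest[:i]))
--         rest = rest[i + 1:]
--     return result
-- ===== Notes on version B (the rewrite author's own statement) =====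
-- stated objective: alternative
-- what changed: Replaces the char-by-char accumulator loop (growing a buffer string with += and flushing it on each newline) by a search-and-slice algorithm: repeatedly locate the next '\n' element with index, emit the join of the slice before it in one shot, and continue on the remainder.
import Mathlib
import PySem

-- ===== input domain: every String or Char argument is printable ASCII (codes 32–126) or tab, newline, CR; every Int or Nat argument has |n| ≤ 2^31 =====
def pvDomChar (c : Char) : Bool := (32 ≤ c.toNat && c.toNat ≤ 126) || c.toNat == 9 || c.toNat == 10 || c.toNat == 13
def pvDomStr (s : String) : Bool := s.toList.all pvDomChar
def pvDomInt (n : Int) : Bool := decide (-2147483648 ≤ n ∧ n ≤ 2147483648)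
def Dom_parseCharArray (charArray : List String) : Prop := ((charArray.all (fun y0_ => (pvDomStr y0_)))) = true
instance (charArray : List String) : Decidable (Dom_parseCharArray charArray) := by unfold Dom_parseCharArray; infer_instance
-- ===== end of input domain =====

-- B replaces A's char-by-char buffer accumulation (string +=) by repeated index/slice/join; return values are proved equal (objective: alternative).

-- ===== PORT A =====
-- literal port of A: fold over the elements carrying (r, string)
def parseCharArray (charArray : List String) : List String :=
  (charArray.foldl
    (fun (st : List String × String) char =>
      if char ≠ "\n" then (st.1, st.2 ++ char) else (st.1 ++ [st.2], ""))
    ([], "")).1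

-- ===== PORT B =====
-- the while-loop of Source B: find next "\n", emit join of the prefix, continue on the suffix
def pvSplitLoop (rest : List String) (result : List String) : List String :=
  match h : PySem.List.index? rest "\n" with
  | none => result
  | some i =>
      pvSplitLoop (PySem.List.slice rest (some ((i : Int) + 1)) none)
        (result ++ [PySem.Str.join "" (PySem.List.slice rest none (some (i : Int)))])
termination_by rest.length
decreasing_by
  obtain ⟨hk, -, -⟩ := PySem.List.getElem_of_index?_eq_some h
  have : ((i : Int) + 1) = ((i + 1 : Nat) : Int) := by push_cast; ring
  rw [this, PySem.List.slice_from_natCast]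
  simp [List.length_drop]; omega

def parseCharArray_alt (charArray : List String) : List String :=
  pvSplitLoop charArray []

-- ===== PRECONDITION & SPEC =====
def Spec_parseCharArray (charArray : List String) (out : List String) : Prop := out = parseCharArray_alt charArray
instance (charArray : List String) (out : List String) : Decidable (Spec_parseCharArray charArray out) := by unfold Spec_parseCharArray; infer_instance

-- ===== CLAIM (what is proved, stated in full; the proofs are below) =====
def Claim_equal_parseCharArray : Prop := ∀ (charArray : List String), Dom_parseCharArray charArray → Spec_parseCharArray charArray (parseCharArray charArray)

-- ===== LEMMAS AND PROOFS =====

-- the A-loop body, named for convenience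
def pvStepA (st : List String × String) (char : String) : List String × String :=
  if char ≠ "\n" then (st.1, st.2 ++ char) else (st.1 ++ [st.2], "")

theorem pv_empty_append (s : String) : "" ++ s = s := by
  apply String.ext; simp

theorem pv_join_cons (c : String) (l : List String) :
    PySem.Str.join "" (c :: l) = c ++ PySem.Str.join "" l := by
  apply String.ext
  cases l with
  | nil =>
      simp [PySem.Str.toList_join, PySem.Chars.join_singleton, PySem.Chars.join_nil,
        String.toList_append]
  | cons d t =>
      simp [PySem.Str.toList_join, PySem.Chars.join_cons_cons, String.toList_append]

-- folding A's body over a newline-free prefix only grows the buffer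
theorem pv_fold_no_newline (pre : List String) (h : "\n" ∉ pre) (r : List String) (s : String) :
    pre.foldl pvStepA (r, s) = (r, s ++ PySem.Str.join "" pre) := by
  induction pre generalizing s with
  | nil =>
      have : s ++ PySem.Str.join "" [] = s := by
        apply String.ext
        simp [PySem.Str.toList_join, PySem.Chars.join_nil, String.toList_append]
      simp [this]
  | cons c pre ih =>
      have hc : c ≠ "\n" := fun hc => h (hc ▸ List.mem_cons_self)
      have hpre : "\n" ∉ pre := fun hm => h (List.mem_cons_of_mem _ hm)
      rw [List.foldl_cons]
      have hstep : pvStepA (r, s) c = (r, s ++ c) := by simp [pvStepA, hc]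
      rw [hstep, ih hpre, pv_join_cons, String.append_assoc]

-- unfolding lemmas for B's loop
theorem pvSplitLoop_none (xs : List String) (r : List String)
    (h : PySem.List.index? xs "\n" = none) : pvSplitLoop xs r = r := by
  unfold pvSplitLoop
  split
  · rfl
  · rename_i i heq; rw [h] at heq; cases heq

theorem pvSplitLoop_some (xs : List String) (r : List String) (i : Nat)
    (h : PySem.List.index? xs "\n" = some i) :
    pvSplitLoop xs r = pvSplitLoop (PySem.List.slice xs (some ((i : Int) + 1)) none)
      (r ++ [PySem.Str.join "" (PySem.List.slice xs none (some (i : Int)))]) := by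
  conv_lhs => unfold pvSplitLoop
  split
  · rename_i heq; rw [h] at heq; cases heq
  · rename_i j heq
    rw [h] at heq
    cases heq
    rfl

theorem pv_main_aux (n : Nat) : ∀ (xs : List String) (r : List String), xs.length ≤ n →
    (xs.foldl pvStepA (r, "")).1 = pvSplitLoop xs r := by
  induction n with
  | zero =>
      intro xs r hlen
      have hnil : xs = [] := List.eq_nil_of_length_eq_zero (Nat.le_zero.mp hlen)
      subst hnil
      rw [pvSplitLoop_none _ _ (by rw [PySem.List.index?_eq_none_iff]; simp)]
      rfl
  | succ n ih =>
      intro xs r hlen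
      cases hidx : PySem.List.index? xs "\n" with
      | none =>
          have hnin := (PySem.List.index?_eq_none_iff xs _).mp hidx
          rw [pv_fold_no_newline xs hnin r "", pvSplitLoop_none _ _ hidx]
      | some i =>
          obtain ⟨pre, suf, hxs2, hlen_pre, hnotin⟩ :=
            (PySem.List.index?_eq_some_iff xs "\n" i).mp hidx
          subst hxs2
          subst hlen_pre
          rw [List.foldl_append, pv_fold_no_newline pre hnotin r "", List.foldl_cons]
          have hstep : pvStepA (r, "" ++ PySem.Str.join "" pre) "\n"
              = (r ++ ["" ++ PySem.Str.join "" pre], "") := by simp [pvStepA]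
          rw [hstep, pv_empty_append]
          have hsuf : suf.length ≤ n := by
            simp [List.length_append] at hlen; omega
          rw [ih suf (r ++ [PySem.Str.join "" pre]) hsuf]
          rw [pvSplitLoop_some (pre ++ "\n" :: suf) r pre.length hidx]
          have hc1 : ((pre.length : Int) + 1) = ((pre.length + 1 : Nat) : Int) := by push_cast; ring
          rw [hc1, PySem.List.slice_from_natCast, PySem.List.slice_to_natCast]
          have hdrop : (pre ++ "\n" :: suf).drop (pre.length + 1) = suf := by
            have : pre ++ "\n" :: suf = (pre ++ ["\n"]) ++ suf := by simp
            rw [this, List.drop_left' (by simp)]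
          have htake : (pre ++ "\n" :: suf).take pre.length = pre :=
            List.take_left' rfl
          rw [hdrop, htake]

theorem pv_main (xs : List String) (r : List String) :
    (xs.foldl pvStepA (r, "")).1 = pvSplitLoop xs r :=
  pv_main_aux xs.length xs r (Nat.le_refl _)

-- ===== VERDICT (by name: the statement is the Claim_ definition above) =====
theorem parseCharArray_spec : Claim_equal_parseCharArray := by
  intro xs _
  unfold Spec_parseCharArray parseCharArray parseCharArray_alt
  have : (fun (st : List String × String) char =>
      if char ≠ "\n" then (st.1, st.2 ++ char) else (st.1 ++ [st.2], "")) = pvStepA := rfl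
  rw [this, pv_main]
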